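-- pv_equiv track=rewrite | github.com/jenniferatalya/BibleMonitoringApp | parsing.py | clean_report
-- ===== SOURCE A (Python) =====
-- def clean_report(text, booknames):
--     text_list = text.split()
--     new_value = list()
--
--     for word in text_list:
--         if word in booknames or word.isdigit() or word == '-':
--             new_value.append(word)
--
--     for i, word in enumerate(new_value):
--         if word == 'kisah':
--             if i + 1 < len(new_value) and new_value[i+1] in booknames:
--                 new_value[i] = ''
--
--     return ' '.join(new_value).strip()
-- ===== SOURCE B (Python) =====
-- def clean_report(text, booknames):
--     result = []
--     for word in text.split():
--         if word in booknames or word.isdigit() or word == '-':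
--             if result and result[-1] == 'kisah' and word in booknames:
--                 result[-1] = ''
--             result.append(word)
--     return ' '.join(result).strip()
-- ===== Notes on version B (the rewrite author's own statement) =====
-- stated objective: simpler
-- what changed: Replaces A's two-phase filter-then-index-walk (with in-place list mutation via enumerate) by a single look-behind pass that blanks the previous kept word at append time.
import Mathlib
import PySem

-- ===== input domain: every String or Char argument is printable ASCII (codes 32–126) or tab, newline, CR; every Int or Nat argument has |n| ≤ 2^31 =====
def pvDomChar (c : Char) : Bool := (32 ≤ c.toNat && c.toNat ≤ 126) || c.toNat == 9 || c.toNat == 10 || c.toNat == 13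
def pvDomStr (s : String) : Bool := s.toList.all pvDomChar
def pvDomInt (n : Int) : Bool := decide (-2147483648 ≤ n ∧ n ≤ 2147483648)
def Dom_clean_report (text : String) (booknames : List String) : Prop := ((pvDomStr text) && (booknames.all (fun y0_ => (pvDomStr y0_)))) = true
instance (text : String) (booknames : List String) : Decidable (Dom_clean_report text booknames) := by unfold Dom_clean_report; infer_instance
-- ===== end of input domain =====

-- B replaces A's two passes (filter, then index-walk mutating in place) by one look-behind pass: simpler decomposition, same cost.

-- ===== PORT A =====
-- keep test: word in booknames or word.isdigit() or word == '-'
def pvKeep (booknames : List String) (word : String) : Bool :=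
  booknames.contains word || PySem.Str.strIsdigit word || word == "-"

-- body of A's second loop: at index i, blank new_value[i] if it is 'kisah' followed by a bookname
def pvStepA (booknames : List String) (nv : List String) (i : Int) : List String :=
  if PySem.List.pyGetD nv i "" == "kisah" then
    if i + 1 < (nv.length : Int) && booknames.contains (PySem.List.pyGetD nv (i + 1) "") then
      PySem.List.pySetD nv i ""
    else nv
  else nv

def clean_report (text : String) (booknames : List String) : String :=
  let text_list := PySem.Str.split₀ text
  let new_value : List String :=
    text_list.foldl (fun nv word => if pvKeep booknames word then nv ++ [word] else nv) []
  let new_value :=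
    (PySem.List.pyRange 0 new_value.length 1).foldl (pvStepA booknames) new_value
  PySem.Str.strip (PySem.Str.join " " new_value)

-- ===== PORT B =====
-- body of B's single loop: look behind, blank result[-1] if it is 'kisah' and the kept word is a bookname
def pvStepB (booknames : List String) (res : List String) (word : String) : List String :=
  if pvKeep booknames word then
    (if res.getLast? == some "kisah" && booknames.contains word then res.dropLast ++ [""] else res) ++ [word]
  else res

def clean_report_alt (text : String) (booknames : List String) : String :=
  let result := (PySem.Str.split₀ text).foldl (pvStepB booknames) []
  PySem.Str.strip (PySem.Str.join " " result)

-- ===== PRECONDITION & SPEC =====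
def Spec_clean_report (text : String) (booknames : List String) (out : String) : Prop := out = clean_report_alt text booknames
instance (text : String) (booknames : List String) (out : String) : Decidable (Spec_clean_report text booknames out) := by unfold Spec_clean_report; infer_instance

-- ===== CLAIM (what is proved, stated in full; the proofs are below) =====
def Claim_equal_clean_report : Prop := ∀ (text : String) (booknames : List String), Dom_clean_report text booknames → Spec_clean_report text booknames (clean_report text booknames)

-- ===== LEMMAS AND PROOFS =====

-- the common characterisation: pairwise blanking of 'kisah' before a bookname
def pvBlank (booknames : List String) : List String → List String
  | [] => []
  | [x] => [x]
  | x :: y :: t =>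
      (if x == "kisah" && booknames.contains y then "" else x) :: pvBlank booknames (y :: t)

-- A's second loop computes pvBlank (generalised over an untouched prefix)
lemma pvStepA_loop (booknames : List String) :
    ∀ (l p : List String),
      (PySem.List.pyRange (p.length : Int) (p.length + l.length) 1).foldl
        (pvStepA booknames) (p ++ l) = p ++ pvBlank booknames l := by
  intro l
  induction l with
  | nil =>
      intro p
      simp [PySem.List.pyRange_one_eq_nil, pvBlank]
  | cons x t ih =>
      intro p
      have hlt : (p.length : Int) < p.length + (x :: t).length := by
        simp only [List.length_cons]; push_cast; omega
      rw [PySem.List.pyRange_one_cons hlt]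
      simp only [List.foldl_cons]
      have hget : PySem.List.pyGetD (p ++ x :: t) (p.length : Int) "" = x := by
        simp [PySem.List.pyGetD_natCast, List.getD]
      have hget1 : PySem.List.pyGetD (p ++ x :: t) ((p.length : Int) + 1) "" = t.getD 0 "" := by
        have : ((p.length : Int) + 1) = ((p.length + 1 : Nat) : Int) := by push_cast; ring
        rw [this, PySem.List.pyGetD_natCast]
        simp [List.getD, List.getElem?_append_right]
      by_cases hx : x = "kisah"
      · subst hx
        by_cases ht : t = []
        · subst ht
          -- i+1 < len is false
          have hstep : pvStepA booknames (p ++ ["kisah"]) (p.length : Int) = p ++ ["kisah"] := by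
            simp [pvStepA, hget]
          rw [hstep]
          have := ih (p ++ ["kisah"])
          simpa [pvBlank, add_assoc, add_comm, add_left_comm] using this
        · obtain ⟨y, t', rfl⟩ : ∃ y t', t = y :: t' := by
            cases t with
            | nil => exact absurd rfl ht
            | cons y t' => exact ⟨y, t', rfl⟩
          by_cases hy : y ∈ booknames
          · have hstep : pvStepA booknames (p ++ "kisah" :: y :: t') (p.length : Int)
                = p ++ "" :: y :: t' := by
              have hset : PySem.List.pySetD (p ++ "kisah" :: y :: t') (p.length : Int) ""
                  = p ++ "" :: y :: t' := by
                rw [PySem.List.pySetD_natCast]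
                simp
              simp only [pvStepA, hget, hget1]
              simp [hy, hset]
            rw [hstep]
            have := ih (p ++ [""])
            simpa [pvBlank, hy, add_assoc, add_comm, add_left_comm] using this
          · have hstep : pvStepA booknames (p ++ "kisah" :: y :: t') (p.length : Int)
                = p ++ "kisah" :: y :: t' := by
              simp only [pvStepA, hget, hget1]
              simp [hy]
            rw [hstep]
            have := ih (p ++ ["kisah"])
            simpa [pvBlank, hy, add_assoc, add_comm, add_left_comm] using this
      · have hstep : pvStepA booknames (p ++ x :: t) (p.length : Int) = p ++ x :: t := by
          simp [pvStepA, hget, hx]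
        rw [hstep]
        have := ih (p ++ [x])
        have hblank : pvBlank booknames (x :: t) = x :: pvBlank booknames t := by
          cases t with
          | nil => simp [pvBlank]
          | cons y t' => simp [pvBlank, hx]
        simpa [hblank, add_assoc, add_comm, add_left_comm] using this

-- B's loop over a filtered tail computes pvBlank (generalised over the prefix)
lemma pvStepB_kept (booknames : List String) (res : List String) (word : String)
    (h : pvKeep booknames word = true) :
    pvStepB booknames res word
      = (if res.getLast? == some "kisah" && booknames.contains word then res.dropLast ++ [""] else res) ++ [word] := by
  simp [pvStepB, h]

lemma pvStepB_loop (booknames : List String) :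
    ∀ (l : List String), (∀ w ∈ l, pvKeep booknames w = true) →
    ∀ (p : List String) (x : String),
      l.foldl (pvStepB booknames) (p ++ [x]) = p ++ pvBlank booknames (x :: l) := by
  intro l
  induction l with
  | nil => intro _ p x; simp [pvBlank]
  | cons w t ih =>
      intro hall p x
      have hw : pvKeep booknames w = true := hall w (by simp)
      have hall' : ∀ u ∈ t, pvKeep booknames u = true := fun u hu => hall u (by simp [hu])
      simp only [List.foldl_cons]
      rw [pvStepB_kept booknames (p ++ [x]) w hw]
      have hlast : (p ++ [x]).getLast? = some x := by simp
      have hdrop : (p ++ [x]).dropLast = p := by simp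
      rw [hlast, hdrop]
      by_cases hcond : x = "kisah" ∧ w ∈ booknames
      · rw [if_pos (by simp [hcond.1, hcond.2])]
        have := ih hall' (p ++ [""]) w
        simpa [pvBlank, hcond.1, hcond.2] using this
      · rw [if_neg (by simpa using hcond)]
        have := ih hall' (p ++ [x]) w
        simpa [pvBlank, hcond] using this

-- B's fold over arbitrary words skips non-kept words: equals fold of kept step over the filter
lemma pvB_filter (booknames : List String) :
    ∀ (l : List String) (acc : List String),
      l.foldl (pvStepB booknames) acc
        = (l.filter (pvKeep booknames)).foldl (pvStepB booknames) acc := by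
  intro l
  induction l with
  | nil => intro acc; rfl
  | cons w t ih =>
      intro acc
      by_cases hw : pvKeep booknames w = true
      · simp [hw, ih]
      · have : pvStepB booknames acc w = acc := by simp [pvStepB, hw]
        simp [hw, ih, this]

-- ===== VERDICT (by name: the statement is the Claim_ definition above) =====
theorem clean_report_spec : Claim_equal_clean_report := by
  intro text booknames _
  unfold Spec_clean_report clean_report clean_report_alt
  simp only []
  have h1 : (PySem.Str.split₀ text).foldl
      (fun nv word => if pvKeep booknames word then nv ++ [word] else nv) ([] : List String)
      = (PySem.Str.split₀ text).filter (pvKeep booknames) := by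
    simpa using PySem.List.foldl_append_if_eq_filter (pvKeep booknames) (PySem.Str.split₀ text) []
  rw [h1]
  have hA : (PySem.List.pyRange 0 (((PySem.Str.split₀ text).filter (pvKeep booknames)).length) 1).foldl
      (pvStepA booknames) ((PySem.Str.split₀ text).filter (pvKeep booknames))
      = pvBlank booknames ((PySem.Str.split₀ text).filter (pvKeep booknames)) := by
    simpa using pvStepA_loop booknames ((PySem.Str.split₀ text).filter (pvKeep booknames)) []
  rw [hA]
  have hB : (PySem.Str.split₀ text).foldl (pvStepB booknames) []
      = pvBlank booknames ((PySem.Str.split₀ text).filter (pvKeep booknames)) := by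
    rw [pvB_filter]
    cases hf : (PySem.Str.split₀ text).filter (pvKeep booknames) with
    | nil => simp [pvBlank]
    | cons x rest =>
        have hx : pvKeep booknames x = true :=
          List.of_mem_filter (hf ▸ List.mem_cons_self : x ∈ (PySem.Str.split₀ text).filter (pvKeep booknames))
        have hrest : ∀ w ∈ rest, pvKeep booknames w = true := fun w hw =>
          List.of_mem_filter (hf ▸ List.mem_cons_of_mem x hw : w ∈ (PySem.Str.split₀ text).filter (pvKeep booknames))
        simp only [List.foldl_cons]
        have hfirst : pvStepB booknames [] x = [x] := by simp [pvStepB, hx]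
        rw [hfirst]
        simpa using pvStepB_loop booknames rest hrest [] x
  rw [hB]
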